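-- pv_equiv track=rewrite | github.com/StevenVGan/scripts | pipeline/tools/chip_downstream_reference/annotation_composition/method2_annotation_composition.py | counter_to_ordered
-- ===== SOURCE A (Python) =====
-- from collections import Counter
--
-- CATEGORY_ORDER = [
--     "Promoter (incl. TSS)",
--     "Intronic",
--     "Intergenic",
--     "Exonic",
--     "TTS (transcription end)",
--     "Non-coding annotation",
--     "Repeat / satellite / other feature",
--     "NA / unannotated",
--     "Other",
-- ]
--
-- def counter_to_ordered(counts: Counter) -> tuple[list[str], list[int]]:
--     """Categories in CATEGORY_ORDER first, then any extras."""
--     seen = set()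
--     labels: list[str] = []
--     values: list[int] = []
--     for cat in CATEGORY_ORDER:
--         if cat in counts:
--             labels.append(cat)
--             values.append(counts[cat])
--             seen.add(cat)
--     for cat, c in sorted(counts.items(), key=lambda x: (-x[1], x[0])):
--         if cat not in seen:
--             labels.append(cat)
--             values.append(c)
--     return labels, values
-- ===== SOURCE B (Python) =====
-- CATEGORY_ORDER = [
--     "Promoter (incl. TSS)",
--     "Intronic",
--     "Intergenic",
--     "Exonic",
--     "TTS (transcription end)",
--     "Non-coding annotation",
--     "Repeat / satellite / other feature",
--     "NA / unannotated",
--     "Other",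
-- ]
--
-- def counter_to_ordered(counts):
--     """One sort over all items: known categories keyed by their fixed rank,
--     extras after them keyed by (-count, name); then unzip."""
--     order_index = {cat: i for i, cat in enumerate(CATEGORY_ORDER)}
--     def key(item):
--         cat, c = item
--         i = order_index.get(cat)
--         return (0, i, "") if i is not None else (1, -c, cat)
--     ordered = sorted(counts.items(), key=key)
--     return [cat for cat, _ in ordered], [c for _, c in ordered]
-- ===== Notes on version B (the rewrite author's own statement) =====
-- stated objective: simpler
-- what changed: A makes a fixed-list membership pass (with a seen-set) and then separately sorts and filters the remaining items; B precomputes order_index once, sorts all items in ONE keyed sort ((0, rank, '') for known categories, (1, -count, name) for the rest) and unzips the result. Pre_ excludes association lists with duplicate keys, which represent no Python dict input.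
import Mathlib
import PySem

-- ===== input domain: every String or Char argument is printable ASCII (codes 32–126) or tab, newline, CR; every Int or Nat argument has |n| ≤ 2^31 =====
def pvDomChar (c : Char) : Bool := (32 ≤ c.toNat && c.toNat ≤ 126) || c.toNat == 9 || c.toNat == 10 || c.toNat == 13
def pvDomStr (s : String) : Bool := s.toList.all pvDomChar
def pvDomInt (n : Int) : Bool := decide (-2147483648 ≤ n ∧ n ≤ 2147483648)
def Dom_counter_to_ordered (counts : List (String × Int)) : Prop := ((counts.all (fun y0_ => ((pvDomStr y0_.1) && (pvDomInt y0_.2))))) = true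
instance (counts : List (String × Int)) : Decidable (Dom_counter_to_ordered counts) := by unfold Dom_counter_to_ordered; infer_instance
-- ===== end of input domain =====

-- B replaces A's fixed-list pass plus separate sort of the remainder by ONE keyed sort of all
-- items (known categories ranked by their fixed index, extras after them by (-count, name)),
-- then an unzip; objective: simpler (one sort, no seen-set bookkeeping).

-- ===== PORT A =====
def CATEGORY_ORDER : List String :=
  ["Promoter (incl. TSS)",
   "Intronic",
   "Intergenic",
   "Exonic",
   "TTS (transcription end)",
   "Non-coding annotation",
   "Repeat / satellite / other feature",
   "NA / unannotated",
   "Other"]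

-- the body of A's first for-loop over CATEGORY_ORDER (state: seen, labels, values)
def aStep (d : PySem.Dict String Int) (st : PySem.Set String × List String × List Int)
    (cat : String) : PySem.Set String × List String × List Int :=
  if d.contains cat then
    -- counts[cat]: the key is present here (guarded by 'cat in counts'), so getD is exact
    (PySem.Set.add st.1 cat, st.2.1 ++ [cat], st.2.2 ++ [d.getD cat 0])
  else st

def counter_to_ordered (counts : List (String × Int)) : List String × List Int :=
  let d : PySem.Dict String Int := PySem.Dict.mk counts
  let st := CATEGORY_ORDER.foldl (aStep d) (PySem.Set.empty, [], [])
  (PySem.List.sorted2 d.items (fun x => -x.2) (fun x => x.1) false).foldl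
    (fun acc kv =>
      if !(PySem.Set.contains st.1 kv.1) then (acc.1 ++ [kv.1], acc.2 ++ [kv.2]) else acc)
    (st.2.1, st.2.2)

-- ===== PORT B =====
-- order_index = {cat: i for i, cat in enumerate(CATEGORY_ORDER)}
def orderIndexB : PySem.Dict String Int :=
  PySem.Dict.ofList ((PySem.List.enumerate CATEGORY_ORDER).map (fun p => (p.2, p.1)))

-- key(item) = (0, i, "") if i is not None else (1, -c, cat)  — a uniform 3-tuple compared lexicographically
def keyB (kv : String × Int) : Lex (Int × Lex (Int × String)) :=
  match orderIndexB.get? kv.1 with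
  | some i => toLex (0, toLex (i, ""))
  | none   => toLex (1, toLex (-kv.2, kv.1))

def counter_to_ordered_alt (counts : List (String × Int)) : List String × List Int :=
  let ordered := PySem.List.sorted (PySem.Dict.mk counts).items keyB false
  (ordered.map Prod.fst, ordered.map Prod.snd)

-- ===== PRECONDITION & SPEC =====
-- A's parameter is a Python dict (a Counter), which cannot hold duplicate keys; association
-- lists with a repeated key represent no Python input, so they are excluded.
def Pre_counter_to_ordered (counts : List (String × Int)) : Prop := (counts.map Prod.fst).Nodup
instance (counts : List (String × Int)) : Decidable (Pre_counter_to_ordered counts) := by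
  unfold Pre_counter_to_ordered; infer_instance

def pvWitness_counter_to_ordered : (List (String × Int)) :=
  [("Intronic", 3), ("zeta", 1), ("alpha", 2)]

def Spec_counter_to_ordered (counts : List (String × Int)) (out : List String × List Int) : Prop :=
  out = counter_to_ordered_alt counts
instance (counts : List (String × Int)) (out : List String × List Int) :
    Decidable (Spec_counter_to_ordered counts out) := by unfold Spec_counter_to_ordered; infer_instance

-- ===== CLAIM (what is proved, stated in full; the proofs are below) =====
def Claim_equal_counter_to_ordered : Prop :=
  ∀ (counts : List (String × Int)), Dom_counter_to_ordered counts →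
    Pre_counter_to_ordered counts →
    Spec_counter_to_ordered counts (counter_to_ordered counts)

-- ===== LEMMAS AND PROOFS =====

-- the tuple key (-x[1], x[0]) of A's extras sort, as one lexicographic value
def K2A (kv : String × Int) : Lex (Int × String) := toLex (-kv.2, kv.1)

-- the known block: categories of CATEGORY_ORDER present in counts, in CATEGORY_ORDER order
def knownsOf (counts : List (String × Int)) : List (String × Int) :=
  CATEGORY_ORDER.filterMap (fun cat =>
    if (PySem.Dict.mk counts).contains cat then
      some (cat, (PySem.Dict.mk counts).getD cat 0)
    else none)

-- the extras block: unknown categories, sorted by (-count, name)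
def extrasOf (counts : List (String × Int)) : List (String × Int) :=
  PySem.List.sorted (counts.filter (fun kv => !(orderIndexB.contains kv.1))) K2A false

lemma before_lex {α β : Type} [LinearOrder α] [LinearOrder β] (x y : α) (s t : β) :
    (decide (x < y) || (!decide (y < x) && decide (s < t))) = decide (toLex (x, s) < toLex (y, t)) := by
  rcases lt_trichotomy x y with h | h | h
  · simp [h, Prod.Lex.toLex_lt_toLex, asymm h]
  · simp [h, Prod.Lex.toLex_lt_toLex]
  · simp only [Prod.Lex.toLex_lt_toLex]
    simp [asymm h, ne_of_gt h]
    exact fun h' => absurd h' (not_le.mpr h)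

-- A's sorted(items, key=lambda x: (-x[1], x[0])) is a sort by the single lexicographic key K2A
lemma sorted2_eq_sorted_K2A (xs : List (String × Int)) :
    PySem.List.sorted2 xs (fun x => -x.2) (fun x => x.1) false = PySem.List.sorted xs K2A false := by
  have hb : (fun (a b : String × Int) => decide (-a.2 < -b.2) || (!decide (-b.2 < -a.2) && decide (a.1 < b.1)))
      = (fun (a b : String × Int) => decide (K2A a < K2A b)) := by
    funext a b; exact before_lex (-a.2) (-b.2) a.1 b.1
  simp only [PySem.List.sorted2, PySem.List.sorted, Bool.false_eq_true, reduceIte, hb]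

lemma orderIndexB_keys : orderIndexB.keys = CATEGORY_ORDER := by decide

lemma orderIndexB_get?_none_iff (cat : String) :
    orderIndexB.get? cat = none ↔ cat ∉ CATEGORY_ORDER := by
  rw [PySem.Dict.get?_eq_none_iff_not_mem_keys, orderIndexB_keys]

lemma orderIndexB_contains_iff (cat : String) :
    orderIndexB.contains cat = true ↔ cat ∈ CATEGORY_ORDER := by
  rw [PySem.Dict.contains_eq_decide_mem_keys, orderIndexB_keys]; simp

lemma mem_CAT_get?_isSome {cat : String} (h : cat ∈ CATEGORY_ORDER) :
    ∃ i, orderIndexB.get? cat = some i := by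
  rcases Option.eq_none_or_eq_some (orderIndexB.get? cat) with he | he
  · rw [orderIndexB_get?_none_iff] at he; exact absurd h he
  · exact he

-- along CATEGORY_ORDER, the order_index values strictly increase
lemma pairwise_get?_lt :
    CATEGORY_ORDER.Pairwise (fun a b => ∀ i j : Int,
      orderIndexB.get? a = some i → orderIndexB.get? b = some j → i < j) := by
  have hitems : orderIndexB.items.Pairwise (fun p q => p.2 < q.2) := by decide
  have hkeys : orderIndexB.keys.Nodup := by decide
  have hmap : CATEGORY_ORDER = orderIndexB.items.map Prod.fst := by decide
  rw [hmap, List.pairwise_map]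
  refine hitems.imp_of_mem ?_
  intro p q hp hq hlt i j hi hj
  have h1 := PySem.Dict.get?_of_mem_items (d := orderIndexB) (k := p.1) (v := p.2) (by simpa using hp) hkeys
  have h2 := PySem.Dict.get?_of_mem_items (d := orderIndexB) (k := q.1) (v := q.2) (by simpa using hq) hkeys
  rw [h1] at hi; rw [h2] at hj
  cases hi; cases hj; exact hlt

-- A's first loop, in closed form
lemma fold1_eq (d : PySem.Dict String Int) (order : List String)
    (S : PySem.Set String) (ls : List String) (vs : List Int) :
    order.foldl (aStep d) (S, ls, vs) =
      (order.foldl (fun S cat => if d.contains cat then PySem.Set.add S cat else S) S,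
       ls ++ (order.filterMap (fun cat =>
                if d.contains cat then some (cat, d.getD cat 0) else none)).map Prod.fst,
       vs ++ (order.filterMap (fun cat =>
                if d.contains cat then some (cat, d.getD cat 0) else none)).map Prod.snd) := by
  induction order generalizing S ls vs with
  | nil => simp
  | cons c rest ih =>
    by_cases hc : d.contains c
    · simp [aStep, hc, List.foldl_cons, ih]
    · simp [aStep, hc, List.foldl_cons, ih]

lemma seen_mem (d : PySem.Dict String Int) (order : List String) (S : PySem.Set String) (x : String) :
    (x ∈ order.foldl (fun S cat => if d.contains cat then PySem.Set.add S cat else S) S) ↔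
      x ∈ S ∨ (x ∈ order ∧ d.contains x = true) := by
  induction order generalizing S with
  | nil => simp
  | cons c rest ih =>
    by_cases hc : d.contains c
    · simp only [List.foldl_cons, hc, if_pos]
      rw [ih]
      simp only [PySem.Set.mem_add, List.mem_cons]
      constructor
      · rintro ((h | rfl) | h)
        · exact Or.inl h
        · exact Or.inr ⟨Or.inl rfl, hc⟩
        · exact Or.inr ⟨Or.inr h.1, h.2⟩
      · rintro (h | ⟨(rfl | h), hx⟩)
        · exact Or.inl (Or.inl h)
        · exact Or.inl (Or.inr rfl)
        · exact Or.inr ⟨h, hx⟩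
    · simp only [List.foldl_cons, hc, if_neg, Bool.false_eq_true, not_false_iff]
      rw [ih]
      simp only [List.mem_cons]
      constructor
      · rintro (h | h)
        · exact Or.inl h
        · exact Or.inr ⟨Or.inr h.1, h.2⟩
      · rintro (h | ⟨(rfl | h), hx⟩)
        · exact Or.inl h
        · exact absurd hx hc
        · exact Or.inr ⟨h, hx⟩

-- A's second loop, in closed form
lemma fold2_eq (seen : PySem.Set String) (ys : List (String × Int)) (ls : List String) (vs : List Int) :
    ys.foldl
      (fun acc kv =>
        if !(PySem.Set.contains seen kv.1) then (acc.1 ++ [kv.1], acc.2 ++ [kv.2]) else acc)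
      (ls, vs) =
      (ls ++ (ys.filter (fun kv => !(PySem.Set.contains seen kv.1))).map Prod.fst,
       vs ++ (ys.filter (fun kv => !(PySem.Set.contains seen kv.1))).map Prod.snd) := by
  induction ys generalizing ls vs with
  | nil => simp
  | cons kv rest ih =>
    rw [List.foldl_cons, List.filter_cons]
    cases hc : PySem.Set.contains seen kv.1 with
    | true =>
      simp only [Bool.not_true, Bool.false_eq_true, if_neg, not_false_iff]
      exact ih ls vs
    | false =>
      simp only [Bool.not_false, if_pos, List.map_cons]
      rw [ih]
      simp

lemma K2A_fst_eq {a b : String × Int} (h : K2A a = K2A b) : a.1 = b.1 := by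
  unfold K2A at h
  have := toLex.injective h
  exact congrArg Prod.snd this

-- with pairwise-distinct categories the K2A-sort is strictly increasing
lemma sorted_strict_K2A (xs : List (String × Int)) (h : (xs.map Prod.fst).Nodup) :
    (PySem.List.sorted xs K2A false).Pairwise (fun a b => K2A a < K2A b) := by
  have h1 := PySem.List.sorted_pairwise xs K2A
  have h2 : ((PySem.List.sorted xs K2A false).map Prod.fst).Nodup :=
    (((PySem.List.sorted_perm xs K2A false).map Prod.fst).nodup_iff).mpr h
  rw [List.Nodup, List.pairwise_map] at h2
  exact (h1.and h2).imp (fun hab => lt_of_le_of_ne hab.1 (fun he => hab.2 (K2A_fst_eq he)))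

lemma mk_keys (counts : List (String × Int)) :
    (PySem.Dict.mk counts).keys = counts.map Prod.fst := by
  simp [PySem.Dict.keys_mk]

lemma mem_knownsOf (counts : List (String × Int)) (cat : String) (v : Int) :
    (cat, v) ∈ knownsOf counts ↔
      cat ∈ CATEGORY_ORDER ∧ (PySem.Dict.mk counts).contains cat = true ∧
        v = (PySem.Dict.mk counts).getD cat 0 := by
  unfold knownsOf
  rw [List.mem_filterMap]
  constructor
  · rintro ⟨c, hc, hf⟩
    by_cases h : (PySem.Dict.mk counts).contains c
    · rw [if_pos h] at hf
      injection hf with hf2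
      cases hf2
      exact ⟨hc, h, rfl⟩
    · rw [if_neg h] at hf; cases hf
  · rintro ⟨hmem, hcon, rfl⟩
    exact ⟨cat, hmem, by rw [if_pos hcon]⟩

lemma map_fst_knownsOf (counts : List (String × Int)) :
    (knownsOf counts).map Prod.fst
      = CATEGORY_ORDER.filter (fun cat => (PySem.Dict.mk counts).contains cat) := by
  unfold knownsOf
  generalize CATEGORY_ORDER = l
  induction l with
  | nil => rfl
  | cons c rest ih =>
    rw [List.filterMap_cons, List.filter_cons]
    by_cases h : (PySem.Dict.mk counts).contains c
    · rw [if_pos h, if_pos h, List.map_cons, ih]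
    · rw [if_neg h, if_neg h, ih]

-- the known block is a rearrangement of the known items of counts
lemma knowns_perm (counts : List (String × Int)) (h : Pre_counter_to_ordered counts) :
    (knownsOf counts).Perm (counts.filter (fun kv => orderIndexB.contains kv.1)) := by
  have hkeys : (PySem.Dict.mk counts).keys.Nodup := by rw [mk_keys]; exact h
  have hn1 : (knownsOf counts).Nodup := by
    have : ((knownsOf counts).map Prod.fst).Nodup := by
      rw [map_fst_knownsOf]
      exact (show CATEGORY_ORDER.Nodup by decide).filter _
    exact this.of_map
  have hn2 : (counts.filter (fun kv => orderIndexB.contains kv.1)).Nodup :=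
    (h.of_map).filter _
  rw [List.perm_ext_iff_of_nodup hn1 hn2]
  rintro ⟨cat, v⟩
  rw [mem_knownsOf, List.mem_filter]
  have hget : (cat, v) ∈ counts ↔ (PySem.Dict.mk counts).get? cat = some v := by
    rw [PySem.Dict.get?_eq_some_iff_mem_items _ _ _ hkeys]
  constructor
  · rintro ⟨hmem, hcon, rfl⟩
    have hsome : ∃ w, (PySem.Dict.mk counts).get? cat = some w := by
      rcases Option.eq_none_or_eq_some ((PySem.Dict.mk counts).get? cat) with he | he
      · rw [PySem.Dict.get?_eq_none_iff_not_mem_keys] at he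
        rw [PySem.Dict.contains_eq_decide_mem_keys] at hcon
        simp only [decide_eq_true_eq] at hcon
        exact absurd hcon he
      · exact he
    obtain ⟨w, hw⟩ := hsome
    have hgd : (PySem.Dict.mk counts).getD cat 0 = w := PySem.Dict.getD_of_get?_eq_some _ 0 hw
    rw [hgd] at hget ⊢
    exact ⟨hget.mpr hw, by rw [orderIndexB_contains_iff]; exact hmem⟩
  · rintro ⟨hmem, hcon⟩
    have hw := hget.mp hmem
    refine ⟨(orderIndexB_contains_iff cat).mp hcon, ?_, ?_⟩
    · rw [PySem.Dict.contains_eq_decide_mem_keys, mk_keys]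
      simp only [decide_eq_true_eq]
      exact List.mem_map.mpr ⟨(cat, v), hmem, rfl⟩
    · rw [PySem.Dict.getD_of_get?_eq_some _ 0 hw]

lemma keyB_known {cat : String} {v i : Int} (h : orderIndexB.get? cat = some i) :
    keyB (cat, v) = toLex (0, toLex (i, "")) := by unfold keyB; rw [h]

lemma keyB_unknown {cat : String} {v : Int} (h : cat ∉ CATEGORY_ORDER) :
    keyB (cat, v) = toLex (1, toLex (-v, cat)) := by
  unfold keyB; rw [(orderIndexB_get?_none_iff cat).mpr h]

lemma knowns_pairwise (counts : List (String × Int)) :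
    (knownsOf counts).Pairwise (fun a b => keyB a < keyB b) := by
  unfold knownsOf
  rw [List.pairwise_filterMap]
  refine pairwise_get?_lt.imp_of_mem ?_
  intro a b ha hb hR p hp q hq
  by_cases h1 : (PySem.Dict.mk counts).contains a
  · rw [if_pos h1] at hp
    by_cases h2 : (PySem.Dict.mk counts).contains b
    · rw [if_pos h2] at hq
      injection hp with hp'; injection hq with hq'
      obtain ⟨i, hi⟩ := mem_CAT_get?_isSome ha
      obtain ⟨j, hj⟩ := mem_CAT_get?_isSome hb
      subst hp'; subst hq'
      rw [keyB_known hi, keyB_known hj, Prod.Lex.toLex_lt_toLex]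
      exact Or.inr ⟨rfl, by rw [Prod.Lex.toLex_lt_toLex]; exact Or.inl (hR i j hi hj)⟩
    · rw [if_neg h2] at hq; cases hq
  · rw [if_neg h1] at hp; cases hp

lemma mem_extras_unknown (counts : List (String × Int)) {kv : String × Int}
    (h : kv ∈ extrasOf counts) : kv.1 ∉ CATEGORY_ORDER := by
  unfold extrasOf at h
  rw [PySem.List.mem_sorted] at h
  have := (List.mem_filter.mp h).2
  intro hmem
  rw [Bool.not_eq_true', ← Bool.not_eq_true] at this
  exact this ((orderIndexB_contains_iff kv.1).mpr hmem)

lemma extras_pairwise (counts : List (String × Int)) (h : Pre_counter_to_ordered counts) :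
    (extrasOf counts).Pairwise (fun a b => keyB a < keyB b) := by
  have hnod : ((counts.filter (fun kv => !(orderIndexB.contains kv.1))).map Prod.fst).Nodup := by
    have : (counts.filter (fun kv => !(orderIndexB.contains kv.1))).Sublist counts :=
      List.filter_sublist
    exact (this.map Prod.fst).nodup h
  have hs := sorted_strict_K2A _ hnod
  refine hs.imp_of_mem ?_
  intro a b ha hb hlt
  rw [keyB_unknown (mem_extras_unknown counts ha), keyB_unknown (mem_extras_unknown counts hb),
    Prod.Lex.toLex_lt_toLex]
  refine Or.inr ⟨rfl, ?_⟩
  unfold K2A at hlt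
  cases a; cases b; exact hlt

lemma cross_lt (counts : List (String × Int)) :
    ∀ a ∈ knownsOf counts, ∀ b ∈ extrasOf counts, keyB a < keyB b := by
  rintro ⟨ca, va⟩ ha b hb
  obtain ⟨hmem, -, -⟩ := (mem_knownsOf counts ca va).mp ha
  obtain ⟨i, hi⟩ := mem_CAT_get?_isSome hmem
  have hb' := mem_extras_unknown counts hb
  rw [keyB_known hi, show keyB b = toLex (1, toLex (-b.2, b.1)) from keyB_unknown hb',
    Prod.Lex.toLex_lt_toLex]
  exact Or.inl (by norm_num)

-- B's single sort is exactly the known block followed by the extras block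
lemma sorted_keyB_eq (counts : List (String × Int)) (h : Pre_counter_to_ordered counts) :
    PySem.List.sorted counts keyB false = knownsOf counts ++ extrasOf counts := by
  apply PySem.List.sorted_eq_of_perm_of_pairwise_lt
  · refine ((knowns_perm counts h).append (PySem.List.sorted_perm _ _ _)).trans ?_
    exact List.filter_append_perm _ counts
  · rw [List.pairwise_append]
    exact ⟨knowns_pairwise counts, extras_pairwise counts h, cross_lt counts⟩

-- A's filtered extras pass equals the extras block
lemma A_extras_eq (counts : List (String × Int)) (h : Pre_counter_to_ordered counts) :
    (PySem.List.sorted counts K2A false).filter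
        (fun kv => !(PySem.Set.contains
          (CATEGORY_ORDER.foldl
            (fun S cat => if (PySem.Dict.mk counts).contains cat then PySem.Set.add S cat else S)
            PySem.Set.empty) kv.1)) = extrasOf counts := by
  have hcongr : (PySem.List.sorted counts K2A false).filter
        (fun kv => !(PySem.Set.contains
          (CATEGORY_ORDER.foldl
            (fun S cat => if (PySem.Dict.mk counts).contains cat then PySem.Set.add S cat else S)
            PySem.Set.empty) kv.1))
      = (PySem.List.sorted counts K2A false).filter (fun kv => !(orderIndexB.contains kv.1)) := by
    apply List.filter_congr
    intro kv hkv
    rw [PySem.List.mem_sorted] at hkv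
    have hdcon : (PySem.Dict.mk counts).contains kv.1 = true := by
      rw [PySem.Dict.contains_eq_decide_mem_keys, mk_keys]
      simp only [decide_eq_true_eq]
      exact List.mem_map.mpr ⟨kv, hkv, rfl⟩
    congr 1
    rw [Bool.eq_iff_iff, PySem.Set.contains_iff, seen_mem, orderIndexB_contains_iff]
    constructor
    · rintro (h' | h')
      · cases h'
      · exact h'.1
    · intro h'
      exact Or.inr ⟨h', hdcon⟩
  rw [hcongr]
  unfold extrasOf
  symm
  apply PySem.List.sorted_eq_of_perm_of_pairwise_lt
  · exact ((PySem.List.sorted_perm counts K2A false).filter _)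
  · exact (sorted_strict_K2A counts h).filter _

-- ===== VERDICT (by name: the statement is the Claim_ definition above) =====
theorem counter_to_ordered_spec : Claim_equal_counter_to_ordered := by
  intro counts _hdom hpre
  unfold Spec_counter_to_ordered counter_to_ordered counter_to_ordered_alt
  simp only [sorted2_eq_sorted_K2A, fold1_eq, fold2_eq, sorted_keyB_eq counts hpre]
  rw [A_extras_eq counts hpre]
  simp [List.map_append, knownsOf]
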